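-- pv_equiv track=rewrite | github.com/BojarLab/glycowork | glycowork/motif/tokenization.py | constrain_prot
-- ===== SOURCE A (Python) =====
-- chars = ['A','B','C','D','E','F','G','H','I','J','K','L','M','N','P','Q','R','S','T',
--      'V','W','Y', 'X', 'Z'] + ['z']
--
-- def constrain_prot(proteins, libr = None):
--   """Ensures that no characters outside of libr are present in proteins\n
--   | Arguments:
--   | :-
--   | proteins (list): list of proteins as strings
--   | libr (list): sorted list of amino acids occurring in proteins\n
--   | Returns:
--   | :-
--   | Returns list of proteins with only permitted amino acids
--   """
--   if libr is None:
--     libr = chars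
--   #get list of unique characters
--   mega_prot = list(set(list(''.join(proteins))))
--   #check whether any character is not in libr and replace it with a 'z' placeholder character
--   forbidden = [k for k in mega_prot if k not in libr]
--   for k in forbidden:
--     proteins = [j.replace(k,'z') for j in proteins]
--   return proteins
-- ===== SOURCE B (Python) =====
-- chars = ['A','B','C','D','E','F','G','H','I','J','K','L','M','N','P','Q','R','S','T',
--      'V','W','Y', 'X', 'Z'] + ['z']
--
-- def constrain_prot(proteins, libr = None):
--   allowed = set(chars if libr is None else libr)
--   return [''.join(c if c in allowed else 'z' for c in p) for p in proteins]
-- ===== Notes on version B (the rewrite author's own statement) =====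
-- stated objective: simpler
-- what changed: A first joins all proteins, computes the set of distinct forbidden characters, then does one full str.replace pass over every protein per forbidden character; B never computes the forbidden set at all: it builds the allowed set once and rewrites each protein in a single per-character pass, keeping allowed characters and emitting 'z' otherwise.
import Mathlib
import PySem

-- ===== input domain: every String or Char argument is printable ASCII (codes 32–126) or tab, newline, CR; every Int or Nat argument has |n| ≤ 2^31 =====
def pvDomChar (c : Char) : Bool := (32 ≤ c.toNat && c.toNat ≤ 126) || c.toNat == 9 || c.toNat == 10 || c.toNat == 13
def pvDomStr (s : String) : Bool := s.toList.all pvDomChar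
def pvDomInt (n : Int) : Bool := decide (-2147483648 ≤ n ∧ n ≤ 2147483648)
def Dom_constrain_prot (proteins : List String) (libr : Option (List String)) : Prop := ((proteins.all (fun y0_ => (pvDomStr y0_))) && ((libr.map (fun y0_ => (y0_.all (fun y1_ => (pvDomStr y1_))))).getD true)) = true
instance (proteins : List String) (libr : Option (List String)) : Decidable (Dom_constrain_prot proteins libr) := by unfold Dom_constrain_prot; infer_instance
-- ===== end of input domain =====

-- B never computes A's forbidden set: it keeps each character that is in the allowed set and
-- emits 'z' otherwise, in one per-character pass (objective: simpler).

-- ===== PORT A =====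
-- module constant `chars`
def pvChars : List String :=
  ["A","B","C","D","E","F","G","H","I","J","K","L","M","N","P","Q","R","S","T",
   "V","W","Y","X","Z"] ++ ["z"]

def constrain_prot (proteins : List String) (libr : Option (List String)) : List String :=
  let libr := libr.getD pvChars
  -- mega_prot = list(set(list(''.join(proteins)))): the distinct characters (hash order not
  -- modelled; the fold below is order-independent, see the proofs)
  let mega_prot : PySem.Set Char := PySem.Set.ofList (PySem.Str.join "" proteins).toList
  let forbidden : List Char := mega_prot.filter (fun k => !(libr.contains (String.ofList [k])))
  forbidden.foldl (fun ps k => ps.map (fun j => PySem.Str.replace j (String.ofList [k]) "z")) proteins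

-- ===== PORT B =====
def constrain_prot_alt (proteins : List String) (libr : Option (List String)) : List String :=
  -- allowed = set(chars if libr is None else libr)
  let allowed : PySem.Set String := PySem.Set.ofList (libr.getD pvChars)
  -- ''.join(c if c in allowed else 'z' for c in p) for each protein p
  proteins.map (fun p =>
    String.ofList (p.toList.map (fun c => if allowed.contains (String.ofList [c]) then c else 'z')))

-- ===== PRECONDITION & SPEC =====
def Spec_constrain_prot (proteins : List String) (libr : Option (List String)) (out : List String) : Prop := out = constrain_prot_alt proteins libr
instance (proteins : List String) (libr : Option (List String)) (out : List String) : Decidable (Spec_constrain_prot proteins libr out) := by unfold Spec_constrain_prot; infer_instance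

-- ===== CLAIM (what is proved, stated in full; the proofs are below) =====
def Claim_equal_constrain_prot : Prop := ∀ (proteins : List String) (libr : Option (List String)), Dom_constrain_prot proteins libr → Spec_constrain_prot proteins libr (constrain_prot proteins libr)

-- ===== LEMMAS AND PROOFS =====

-- replace with a single-character pattern and single-character replacement is a char map
theorem replace_go_single (k z : Char) :
    ∀ (fuel : Nat) (l acc : List Char), l.length ≤ fuel →
      PySem.Chars.replace.go [k] [z] fuel l acc
        = acc.reverse ++ l.map (fun c => if c = k then z else c) := by
  intro fuel
  induction fuel with
  | zero =>
    intro l acc h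
    have : l = [] := List.eq_nil_of_length_eq_zero (Nat.le_zero.mp h)
    subst this
    simp [PySem.Chars.replace.go]
  | succ n ih =>
    intro l acc h
    cases l with
    | nil => simp [PySem.Chars.replace.go]
    | cons c t =>
      simp only [PySem.Chars.replace.go]
      by_cases hk : c = k
      · subst hk
        have hp : [c].isPrefixOf (c :: t) = true := by simp [List.isPrefixOf]
        simp only [hp, if_pos]
        rw [show List.drop [c].length (c :: t) = t by simp]
        rw [ih t _ (by simpa using Nat.le_of_succ_le_succ h)]
        simp
      · have hp : [k].isPrefixOf (c :: t) = false := by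
          simp [List.isPrefixOf]
          exact fun hh => absurd hh.symm hk
        simp only [hp]
        rw [if_neg (by simp)]
        rw [ih t _ (by simpa using Nat.le_of_succ_le_succ h)]
        simp [hk]

theorem replace_single (k z : Char) (cs : List Char) :
    PySem.Chars.replace cs [k] [z] = cs.map (fun c => if c = k then z else c) := by
  have : ([k] : List Char).isEmpty = false := rfl
  simp only [PySem.Chars.replace, this]
  rw [replace_go_single k z cs.length cs [] (le_refl _)]
  simp

-- folding single-char replacements to 'z' over a list F is a single char-wise map
theorem fold_replace_eq_map (F : List Char) :
    ∀ (ps : List String),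
      F.foldl (fun ps k => ps.map (fun j => PySem.Str.replace j (String.ofList [k]) "z")) ps
        = ps.map (fun j => String.ofList (j.toList.map (fun c => if c ∈ F then 'z' else c))) := by
  induction F with
  | nil =>
    intro ps
    simp only [List.foldl_nil, List.not_mem_nil, if_false]
    conv_lhs => rw [show ps = ps.map id by simp]
    apply List.map_congr_left
    intro j _
    simp [String.ofList_toList]
  | cons k F ih =>
    intro ps
    simp only [List.foldl_cons]
    rw [ih]
    rw [List.map_map]
    apply List.map_congr_left
    intro j _
    simp only [Function.comp]
    have h1 : (PySem.Str.replace j (String.ofList [k]) "z").toList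
        = j.toList.map (fun c => if c = k then 'z' else c) := by
      rw [PySem.Str.toList_replace]
      simp only [String.toList_ofList]
      have : ("z" : String).toList = ['z'] := rfl
      rw [this, replace_single]
    rw [h1, List.map_map]
    congr 1
    apply List.map_congr_left
    intro c _
    simp only [Function.comp, List.mem_cons]
    by_cases hc : c = k
    · simp [hc]
    · simp [hc]

-- characters of ''.join(proteins)
theorem mem_join_chars (proteins : List String) (c : Char) :
    c ∈ (PySem.Str.join "" proteins).toList ↔ ∃ p ∈ proteins, c ∈ p.toList := by
  have hj : (PySem.Str.join "" proteins).toList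
      = (proteins.map String.toList).flatten := by
    simp only [PySem.Str.join, String.toList_ofList]
    generalize proteins.map String.toList = ps
    induction ps with
    | nil => rfl
    | cons h t iht =>
      cases t with
      | nil => simp [PySem.Chars.join, List.intercalate]
      | cons h2 t2 => simp_all [PySem.Chars.join, List.intercalate]
  rw [hj]
  simp [List.mem_flatten]

-- ===== VERDICT (by name: the statement is the Claim_ definition above) =====
theorem constrain_prot_spec : Claim_equal_constrain_prot := by
  intro proteins libr _
  unfold Spec_constrain_prot constrain_prot constrain_prot_alt
  set L := libr.getD pvChars with hLdef
  set mega : PySem.Set Char := PySem.Set.ofList (PySem.Str.join "" proteins).toList with hmega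
  set F : List Char := mega.filter (fun k => !(L.contains (String.ofList [k]))) with hF
  rw [fold_replace_eq_map]
  apply List.map_congr_left
  intro j hj
  congr 1
  apply List.map_congr_left
  intro c hc
  have hcmem : c ∈ mega := by
    rw [hmega, PySem.Set.mem_ofList]
    exact (mem_join_chars proteins c).mpr ⟨j, hj, hc⟩
  have hmemF : (c ∈ F) = (String.ofList [c] ∉ L) := by
    rw [hF]
    simp [List.mem_filter, hcmem]
  have hCont : (PySem.Set.ofList L).contains (String.ofList [c]) = true ↔ String.ofList [c] ∈ L := by
    rw [PySem.Set.contains_iff, PySem.Set.mem_ofList]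
  by_cases hall : (String.ofList [c]) ∈ L
  · rw [if_neg (by rw [hmemF]; simp [hall]), if_pos (hCont.mpr hall)]
  · rw [if_pos (by rw [hmemF]; exact hall), if_neg (fun hh => absurd (hCont.mp hh) hall)]
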